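-- pv_equiv track=rewrite | github.com/jahid-github/Python-Codes.git.io | Robotic Path Planning Functions.py | navigate_with_obstacles
-- ===== SOURCE A (Python) =====
-- def generate_path(start_position: tuple, target_position: tuple) -> list:
--     """
--     Generate a sequence of movements to reach the target position from the start position using Manhattan distance.
--     """
--     current_position=start_position
--     target_x, target_y=target_position
--     path=[]
--
--     # Move horizontally first (East or West) using a dictionary to avoid if statements
--     horizontal_distance = target_x - current_position[0]
--     direction = 'E' if horizontal_distance > 0 else 'W'
--     if horizontal_distance != 0:
--         path.append((direction, abs(horizontal_distance)))
--
--     # Move vertically (North or South) using a dictionary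
--     vertical_distance = target_y - current_position[1]
--     direction = 'N' if vertical_distance > 0 else 'S'
--     if vertical_distance != 0:
--         path.append((direction, abs(vertical_distance)))
--     return path
--
-- def navigate_with_obstacles(start_position: tuple, target_position: tuple, obstacles: list) ->list:
--     """
--     Navigate from start to target position while checking for obstacles in the path.
--     If any obstacle is found on the path, return None.
--     """
--     path=generate_path(start_position, target_position)
--     current_position=start_position
--
--     # Using a dictionary to avoid if statements for movement
--     direction_map={"N": (0, 1), "S": (0, -1), "E":(1, 0), "W": (-1, 0)}
--
--     # Check each movement in the path
--     for direction, distance in path: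
--         dx, dy = direction_map[direction]
--         for i in range (distance):
--            current_position=(current_position[0]+dx, current_position[1]+dy)
--            #Check if the current position is an obstacle
--            if current_position in obstacles:
--                return None
--     return path
-- ===== SOURCE B (Python) =====
-- def generate_path(start_position: tuple, target_position: tuple) -> list:
--     current_position = start_position
--     target_x, target_y = target_position
--     path = []
--     horizontal_distance = target_x - current_position[0]
--     direction = 'E' if horizontal_distance > 0 else 'W'
--     if horizontal_distance != 0:
--         path.append((direction, abs(horizontal_distance)))
--     vertical_distance = target_y - current_position[1]
--     direction = 'N' if vertical_distance > 0 else 'S'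
--     if vertical_distance != 0:
--         path.append((direction, abs(vertical_distance)))
--     return path
--
--
-- def navigate_with_obstacles(start_position: tuple, target_position: tuple, obstacles: list) -> list:
--     """Instead of walking the path cell by cell, test each obstacle once with a
--     closed-form check: the L-shaped path covers exactly the horizontal segment
--     from (excluded) start to the corner and the vertical segment from the corner
--     (start row excluded) to the target."""
--     path = generate_path(start_position, target_position)
--     sx, sy = start_position
--     tx, ty = target_position
--     for ox, oy in obstacles:
--         on_horizontal = oy == sy and ox != sx and min(sx, tx) <= ox <= max(sx, tx)
--         on_vertical = ox == tx and oy != sy and min(sy, ty) <= oy <= max(sy, ty)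
--         if on_horizontal or on_vertical:
--             return None
--     return path
-- ===== Notes on version B (the rewrite author's own statement) =====
-- stated objective: faster
-- what changed: Replaced A's cell-by-cell walk along the L-shaped path (testing each stepped cell against the obstacle list) by a closed-form geometric test applied once per obstacle, so the Manhattan distance is never iterated at all.
import Mathlib
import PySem

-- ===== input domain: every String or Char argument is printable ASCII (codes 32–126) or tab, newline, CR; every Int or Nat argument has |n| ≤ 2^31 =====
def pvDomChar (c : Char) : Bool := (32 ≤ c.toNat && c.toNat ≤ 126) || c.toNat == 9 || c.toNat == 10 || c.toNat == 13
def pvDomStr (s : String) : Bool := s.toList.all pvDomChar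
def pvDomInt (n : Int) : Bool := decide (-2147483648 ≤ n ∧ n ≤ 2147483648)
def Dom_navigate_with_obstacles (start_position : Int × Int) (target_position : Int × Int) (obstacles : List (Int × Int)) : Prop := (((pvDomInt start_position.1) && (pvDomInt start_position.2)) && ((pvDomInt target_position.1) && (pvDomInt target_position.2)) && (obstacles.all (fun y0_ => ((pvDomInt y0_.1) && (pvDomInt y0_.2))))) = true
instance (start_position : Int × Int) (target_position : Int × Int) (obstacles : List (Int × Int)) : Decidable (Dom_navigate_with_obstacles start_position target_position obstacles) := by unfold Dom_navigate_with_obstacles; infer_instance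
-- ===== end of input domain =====

-- B replaces A's cell-by-cell walk along the L-shaped path by a closed-form geometric
-- test applied once per obstacle, so the Manhattan distance is never iterated (faster).

-- ===== PORT A =====
def pvGeneratePath (start_position target_position : Int × Int) : List (String × Int) :=
  let horizontal_distance := target_position.1 - start_position.1
  let path : List (String × Int) :=
    if horizontal_distance ≠ 0 then
      [((if horizontal_distance > 0 then "E" else "W"), |horizontal_distance|)]
    else []
  let vertical_distance := target_position.2 - start_position.2
  if vertical_distance ≠ 0 then
    path ++ [((if vertical_distance > 0 then "N" else "S"), |vertical_distance|)]
  else path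

def pvDirMap : PySem.Dict String (Int × Int) :=
  ((((PySem.Dict.empty).insert "N" ((0 : Int), (1 : Int))).insert "S" (0, -1)).insert "E" (1, 0)).insert "W" (-1, 0)

-- inner 'for i in range(distance)' with A's early return on an obstacle;
-- distance is an abs so it is ≥ 0 and '.toNat' is exact here
def pvStepsA (obstacles : List (Int × Int)) (d : Int × Int) : Nat → (Int × Int) → Option (Int × Int)
  | 0, pos => some pos
  | n + 1, pos =>
    let pos' := (pos.1 + d.1, pos.2 + d.2)
    if pos' ∈ obstacles then none else pvStepsA obstacles d n pos'

-- outer 'for direction, distance in path'; the dict lookup always hits, so getD is exact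
def pvLoopA (obstacles : List (Int × Int)) : List (String × Int) → (Int × Int) → Option Unit
  | [], _ => some ()
  | (dir, dist) :: rest, pos =>
    match pvStepsA obstacles (pvDirMap.getD dir (0, 0)) dist.toNat pos with
    | none => none
    | some pos' => pvLoopA obstacles rest pos'

def navigate_with_obstacles (start_position : Int × Int) (target_position : Int × Int) (obstacles : List (Int × Int)) : Option (List (String × Int)) :=
  let path := pvGeneratePath start_position target_position
  match pvLoopA obstacles path start_position with
  | none => none
  | some _ => some path

-- ===== PORT B =====
def pvGeneratePathB (start_position target_position : Int × Int) : List (String × Int) :=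
  let horizontal_distance := target_position.1 - start_position.1
  let path : List (String × Int) :=
    if horizontal_distance ≠ 0 then
      [((if horizontal_distance > 0 then "E" else "W"), |horizontal_distance|)]
    else []
  let vertical_distance := target_position.2 - start_position.2
  if vertical_distance ≠ 0 then
    path ++ [((if vertical_distance > 0 then "N" else "S"), |vertical_distance|)]
  else path

-- 'for ox, oy in obstacles:' with the closed-form segment test and B's early return
def pvScanB (sx sy tx ty : Int) : List (Int × Int) → Option Unit
  | [] => some ()
  | (ox, oy) :: rest =>
    let on_horizontal := (oy == sy) && (ox != sx) && decide (min sx tx ≤ ox) && decide (ox ≤ max sx tx)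
    let on_vertical := (ox == tx) && (oy != sy) && decide (min sy ty ≤ oy) && decide (oy ≤ max sy ty)
    if on_horizontal || on_vertical then none else pvScanB sx sy tx ty rest

def navigate_with_obstacles_alt (start_position : Int × Int) (target_position : Int × Int) (obstacles : List (Int × Int)) : Option (List (String × Int)) :=
  let path := pvGeneratePathB start_position target_position
  match pvScanB start_position.1 start_position.2 target_position.1 target_position.2 obstacles with
  | none => none
  | some _ => some path

-- ===== PRECONDITION & SPEC =====
def Spec_navigate_with_obstacles (start_position : Int × Int) (target_position : Int × Int) (obstacles : List (Int × Int)) (out : Option (List (String × Int))) : Prop := out = navigate_with_obstacles_alt start_position target_position obstacles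
instance (start_position : Int × Int) (target_position : Int × Int) (obstacles : List (Int × Int)) (out : Option (List (String × Int))) : Decidable (Spec_navigate_with_obstacles start_position target_position obstacles out) := by unfold Spec_navigate_with_obstacles; infer_instance

-- ===== CLAIM (what is proved, stated in full; the proofs are below) =====
def Claim_equal_navigate_with_obstacles : Prop := ∀ (start_position : Int × Int) (target_position : Int × Int) (obstacles : List (Int × Int)), Dom_navigate_with_obstacles start_position target_position obstacles → Spec_navigate_with_obstacles start_position target_position obstacles (navigate_with_obstacles start_position target_position obstacles)

-- ===== LEMMAS AND PROOFS =====
-- cells visited along one segment / the whole path, and the end position of a segment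
def pvCellList (d : Int × Int) : Nat → (Int × Int) → List (Int × Int)
  | 0, _ => []
  | n + 1, pos => (pos.1 + d.1, pos.2 + d.2) :: pvCellList d n (pos.1 + d.1, pos.2 + d.2)

def pvEnd (d : Int × Int) : Nat → (Int × Int) → Int × Int
  | 0, pos => pos
  | n + 1, pos => pvEnd d n (pos.1 + d.1, pos.2 + d.2)

def pvAllCells : List (String × Int) → (Int × Int) → List (Int × Int)
  | [], _ => []
  | (dir, dist) :: rest, pos =>
    pvCellList (pvDirMap.getD dir (0, 0)) dist.toNat pos ++
      pvAllCells rest (pvEnd (pvDirMap.getD dir (0, 0)) dist.toNat pos)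

-- the closed-form "cell lies on the L-path" predicate, as a Prop
def pvHit (s t c : Int × Int) : Prop :=
  (c.2 = s.2 ∧ c.1 ≠ s.1 ∧ min s.1 t.1 ≤ c.1 ∧ c.1 ≤ max s.1 t.1) ∨
  (c.1 = t.1 ∧ c.2 ≠ s.2 ∧ min s.2 t.2 ≤ c.2 ∧ c.2 ≤ max s.2 t.2)

theorem pvGeneratePathB_eq (s t : Int × Int) : pvGeneratePathB s t = pvGeneratePath s t := rfl

theorem pvStepsA_eq (obs : List (Int × Int)) (d : Int × Int) :
    ∀ (n : Nat) (pos : Int × Int),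
      pvStepsA obs d n pos =
        if (pvCellList d n pos).any (fun c => decide (c ∈ obs)) then none else some (pvEnd d n pos) := by
  intro n
  induction n with
  | zero => intro pos; simp [pvStepsA, pvCellList, pvEnd]
  | succ n ih =>
    intro pos
    simp only [pvStepsA, pvCellList, pvEnd, List.any_cons, ih]
    by_cases h : (pos.1 + d.1, pos.2 + d.2) ∈ obs
    · simp [h]
    · rw [if_neg h, decide_eq_false h, Bool.false_or]

theorem pvLoopA_eq (obs : List (Int × Int)) :
    ∀ (path : List (String × Int)) (pos : Int × Int),
      pvLoopA obs path pos =
        if (pvAllCells path pos).any (fun c => decide (c ∈ obs)) then none else some () := by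
  intro path
  induction path with
  | nil => intro pos; simp [pvLoopA, pvAllCells]
  | cons hd rest ih =>
    intro pos
    obtain ⟨dir, dist⟩ := hd
    simp only [pvLoopA, pvAllCells, pvStepsA_eq, List.any_append]
    by_cases h : (pvCellList (pvDirMap.getD dir (0, 0)) dist.toNat pos).any (fun c => decide (c ∈ obs))
    · simp [h]
    · rw [Bool.not_eq_true] at h
      rw [h]
      simp only [Bool.false_or]
      simp [ih]

-- characterisations of one straight segment, per direction
theorem pvCellList_E : ∀ (n : Nat) (p c : Int × Int),
    c ∈ pvCellList (1, 0) n p ↔ c.2 = p.2 ∧ p.1 + 1 ≤ c.1 ∧ c.1 ≤ p.1 + n := by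
  intro n
  induction n with
  | zero => intro p c; simp only [pvCellList, List.not_mem_nil, false_iff]; omega
  | succ n ih => intro p c; simp only [pvCellList, List.mem_cons, ih, Prod.ext_iff]; omega

theorem pvCellList_W : ∀ (n : Nat) (p c : Int × Int),
    c ∈ pvCellList (-1, 0) n p ↔ c.2 = p.2 ∧ p.1 - n ≤ c.1 ∧ c.1 ≤ p.1 - 1 := by
  intro n
  induction n with
  | zero => intro p c; simp only [pvCellList, List.not_mem_nil, false_iff]; omega
  | succ n ih => intro p c; simp only [pvCellList, List.mem_cons, ih, Prod.ext_iff]; omega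

theorem pvCellList_N : ∀ (n : Nat) (p c : Int × Int),
    c ∈ pvCellList (0, 1) n p ↔ c.1 = p.1 ∧ p.2 + 1 ≤ c.2 ∧ c.2 ≤ p.2 + n := by
  intro n
  induction n with
  | zero => intro p c; simp only [pvCellList, List.not_mem_nil, false_iff]; omega
  | succ n ih => intro p c; simp only [pvCellList, List.mem_cons, ih, Prod.ext_iff]; omega

theorem pvCellList_S : ∀ (n : Nat) (p c : Int × Int),
    c ∈ pvCellList (0, -1) n p ↔ c.1 = p.1 ∧ p.2 - n ≤ c.2 ∧ c.2 ≤ p.2 - 1 := by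
  intro n
  induction n with
  | zero => intro p c; simp only [pvCellList, List.not_mem_nil, false_iff]; omega
  | succ n ih => intro p c; simp only [pvCellList, List.mem_cons, ih, Prod.ext_iff]; omega

theorem pvEnd_E : ∀ (n : Nat) (p : Int × Int), pvEnd (1, 0) n p = (p.1 + n, p.2) := by
  intro n
  induction n with
  | zero => intro p; simp [pvEnd]
  | succ n ih => intro p; simp only [pvEnd, ih, Prod.mk.injEq]; exact ⟨by omega, by omega⟩

theorem pvEnd_W : ∀ (n : Nat) (p : Int × Int), pvEnd (-1, 0) n p = (p.1 - n, p.2) := by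
  intro n
  induction n with
  | zero => intro p; simp [pvEnd]
  | succ n ih => intro p; simp only [pvEnd, ih, Prod.mk.injEq]; exact ⟨by omega, by omega⟩

theorem pvDir_N : pvDirMap.getD "N" (0, 0) = (0, 1) := by decide
theorem pvDir_S : pvDirMap.getD "S" (0, 0) = (0, -1) := by decide
theorem pvDir_E : pvDirMap.getD "E" (0, 0) = (1, 0) := by decide
theorem pvDir_W : pvDirMap.getD "W" (0, 0) = (-1, 0) := by decide

-- the walked cells of A's generated path are exactly the cells the closed form accepts
theorem pvPathCells (s t c : Int × Int) :
    c ∈ pvAllCells (pvGeneratePath s t) s ↔ pvHit s t c := by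
  obtain ⟨s1, s2⟩ := s
  obtain ⟨t1, t2⟩ := t
  obtain ⟨c1, c2⟩ := c
  unfold pvGeneratePath pvHit
  dsimp only
  split_ifs with h1 h2 h3 h3 h2 h3 h3 <;>
    simp [pvAllCells, pvDir_N, pvDir_S, pvDir_E, pvDir_W, Int.abs_eq_natAbs,
      pvCellList_E, pvCellList_W, pvCellList_N, pvCellList_S, pvEnd_E, pvEnd_W, -Nat.cast_natAbs] <;> omega

theorem pvScanB_none_iff (sx sy tx ty : Int) :
    ∀ (obs : List (Int × Int)),
      pvScanB sx sy tx ty obs = none ↔ ∃ c ∈ obs, pvHit (sx, sy) (tx, ty) c := by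
  intro obs
  induction obs with
  | nil => simp [pvScanB]
  | cons hd rest ih =>
    obtain ⟨ox, oy⟩ := hd
    simp only [pvScanB]
    by_cases h : pvHit (sx, sy) (tx, ty) (ox, oy)
    · rw [if_pos]
      · simp [h]
      · unfold pvHit at h
        simp only [Bool.or_eq_true, Bool.and_eq_true, beq_iff_eq, bne_iff_ne, decide_eq_true_eq]
        tauto
    · rw [if_neg]
      · rw [ih]
        constructor
        · rintro ⟨c, hc, hh⟩; exact ⟨c, List.mem_cons_of_mem _ hc, hh⟩
        · rintro ⟨c, hc, hh⟩
          rcases List.mem_cons.1 hc with rfl | hc'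
          · exact absurd hh h
          · exact ⟨c, hc', hh⟩
      · unfold pvHit at h
        simp only [Bool.or_eq_true, Bool.and_eq_true, beq_iff_eq, bne_iff_ne, decide_eq_true_eq]
        tauto

-- ===== VERDICT (by name: the statement is the Claim_ definition above) =====
theorem navigate_with_obstacles_spec : Claim_equal_navigate_with_obstacles := by
  intro s t obs _
  unfold Spec_navigate_with_obstacles navigate_with_obstacles navigate_with_obstacles_alt
  show (match pvLoopA obs (pvGeneratePath s t) s with
        | none => (none : Option (List (String × Int)))
        | some _ => some (pvGeneratePath s t)) =
      (match pvScanB s.1 s.2 t.1 t.2 obs with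
        | none => (none : Option (List (String × Int)))
        | some _ => some (pvGeneratePathB s t))
  rw [pvGeneratePathB_eq, pvLoopA_eq]
  by_cases h : ∃ c ∈ obs, pvHit s t c
  · have hb : pvScanB s.1 s.2 t.1 t.2 obs = none := (pvScanB_none_iff s.1 s.2 t.1 t.2 obs).2 (by simpa using h)
    have ha : (pvAllCells (pvGeneratePath s t) s).any (fun c => decide (c ∈ obs)) = true := by
      rw [List.any_eq_true]
      obtain ⟨c, hc, hh⟩ := h
      exact ⟨c, (pvPathCells s t c).2 hh, by simpa using hc⟩
    rw [hb, ha]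
    rfl
  · have hb : pvScanB s.1 s.2 t.1 t.2 obs = some () := by
      cases hsc : pvScanB s.1 s.2 t.1 t.2 obs with
      | none => exact absurd ((pvScanB_none_iff s.1 s.2 t.1 t.2 obs).1 hsc) (by simpa using h)
      | some u => cases u; rfl
    have ha : (pvAllCells (pvGeneratePath s t) s).any (fun c => decide (c ∈ obs)) = false := by
      rw [Bool.eq_false_iff]
      intro hany
      rw [List.any_eq_true] at hany
      obtain ⟨c, hc, hco⟩ := hany
      exact h ⟨c, by simpa using hco, (pvPathCells s t c).1 hc⟩
    rw [hb, ha]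
    rfl
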